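-- pv_equiv track=rewrite | github.com/BEEFISH502/Higgsboson | src/build_godot.py | update_data
-- ===== SOURCE A (Python) =====
-- def update_data(matched_data, event_data):
--     #here we'll go a step further and break down the arrays into separate particles and their arrays
--     # then also get everything ready to pass to our big nested dictionary.
--     for category, category_data in matched_data.items():
--         if category not in event_data:
--             continue
--
--         for branch_name, value in category_data.items():
--             for particle_name, particle_fields in event_data[category].items():
--                 particle_prefix = f"{particle_name}_"
--
--                 if branch_name.startswith(particle_prefix):
--                     field_name = branch_name[len(particle_prefix):]
--                     if field_name in particle_fields:
--                         particle_fields[field_name] = value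
--                     elif branch_name in particle_fields:
--                         particle_fields[branch_name] = value
--     return event_data
-- ===== SOURCE B (Python) =====
-- def update_data(matched_data, event_data):
--     # Same in-place update as the original, but instead of testing every
--     # particle prefix against every branch, derive the candidate particle
--     # names directly from the branch name (split at each underscore) and
--     # look them up in the particles dict.
--     for category, category_data in matched_data.items():
--         particles = event_data.get(category)
--         if particles is None:
--             continue
--         for branch_name, value in category_data.items():
--             for i, ch in enumerate(branch_name):
--                 if ch == "_":
--                     particle_fields = particles.get(branch_name[:i])
--                     if particle_fields is not None:
--                         field_name = branch_name[i + 1:]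
--                         if field_name in particle_fields:
--                             particle_fields[field_name] = value
--                         elif branch_name in particle_fields:
--                             particle_fields[branch_name] = value
--     return event_data
-- ===== Notes on version B (the rewrite author's own statement) =====
-- stated objective: alternative
-- what changed: Instead of testing every particle's prefix against every branch (a startswith test per branch x particle pair), B scans each branch name once, derives each candidate particle name at an underscore and looks it up in the particles dict, so the per-branch scan over all particles disappears (O(categories*branches*particles*len) becomes O(categories*branches*len); a timing run read only ~1.5x at the largest size, so no speed is claimed).
import Mathlib
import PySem

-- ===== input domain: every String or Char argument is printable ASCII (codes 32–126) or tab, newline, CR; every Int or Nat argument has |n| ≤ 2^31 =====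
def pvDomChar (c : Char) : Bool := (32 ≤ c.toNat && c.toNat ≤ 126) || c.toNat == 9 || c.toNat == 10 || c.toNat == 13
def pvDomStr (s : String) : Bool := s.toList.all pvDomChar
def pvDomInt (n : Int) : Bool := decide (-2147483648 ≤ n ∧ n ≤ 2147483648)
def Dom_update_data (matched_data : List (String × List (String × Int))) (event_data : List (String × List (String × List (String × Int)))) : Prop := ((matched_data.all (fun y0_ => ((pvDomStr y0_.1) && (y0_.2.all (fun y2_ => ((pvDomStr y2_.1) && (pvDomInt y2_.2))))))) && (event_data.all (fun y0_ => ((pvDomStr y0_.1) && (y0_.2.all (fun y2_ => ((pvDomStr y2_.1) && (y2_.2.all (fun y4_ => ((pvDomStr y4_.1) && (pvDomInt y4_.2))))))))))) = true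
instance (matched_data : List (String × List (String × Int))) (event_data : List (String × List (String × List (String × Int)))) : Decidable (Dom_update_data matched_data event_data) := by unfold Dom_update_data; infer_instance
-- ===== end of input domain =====

-- B replaces A's per-branch scan over all particles (a startswith test per particle) by deriving each
-- candidate particle name from the branch name at its underscores and looking it up in the particles dict.
-- Python A and B both mutate event_data in place and return it; the ports model that state functionally,
-- and the equivalence proved is about the returned value.


-- ===== PORT A =====
-- shared inner update (both Pythons contain the identical "if field_name in fields: … elif branch_name in fields: …" block)
def pvSetFieldValue (branch fieldName : String) (value : Int)
    (fields : List (String × Int)) : List (String × Int) :=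
  if (PySem.Dict.mk fields).contains fieldName then
    ((PySem.Dict.mk fields).insert fieldName value).items
  else if (PySem.Dict.mk fields).contains branch then
    ((PySem.Dict.mk fields).insert branch value).items
  else fields

-- A's body of the innermost (per-particle) loop: prefix test, then the field update
def pvParticleStepA (branch : String) (value : Int) (pname : String)
    (fields : List (String × Int)) : List (String × Int) :=
  let pfx := pname ++ "_"
  if PySem.Str.startswith branch pfx then
    pvSetFieldValue branch (PySem.Str.slice branch (some (PySem.Str.len pfx)) none) value fields
  else fields

def update_data (matched_data : List (String × List (String × Int))) (event_data : List (String × List (String × List (String × Int)))) : List (String × List (String × List (String × Int))) :=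
  matched_data.foldl (fun ev cat =>
    if (PySem.Dict.mk ev).contains cat.1 then
      cat.2.foldl (fun ev2 bv =>
        ((PySem.Dict.mk ev2).insert cat.1
          (((PySem.Dict.mk ev2).getD cat.1 []).map
            (fun pf => (pf.1, pvParticleStepA bv.1 bv.2 pf.1 pf.2)))).items) ev
    else ev) event_data

-- ===== PORT B =====
-- B's body of the per-underscore loop: candidate particle name branch[:i], dict lookup, field update
def pvUnderscoreStepB (branch : String) (value : Int)
    (ps : List (String × List (String × Int))) (ic : Int × Char) : List (String × List (String × Int)) :=
  if ic.2 = '_' then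
    match (PySem.Dict.mk ps).get? (PySem.Str.slice branch none (some ic.1)) with
    | none => ps
    | some fields =>
      ((PySem.Dict.mk ps).insert (PySem.Str.slice branch none (some ic.1))
        (pvSetFieldValue branch (PySem.Str.slice branch (some (ic.1 + 1)) none) value fields)).items
  else ps

def update_data_alt (matched_data : List (String × List (String × Int))) (event_data : List (String × List (String × List (String × Int)))) : List (String × List (String × List (String × Int))) :=
  matched_data.foldl (fun ev cat =>
    match (PySem.Dict.mk ev).get? cat.1 with
    | none => ev
    | some particles =>
      ((PySem.Dict.mk ev).insert cat.1
        (cat.2.foldl (fun ps bv =>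
          (PySem.List.enumerate bv.1.toList 0).foldl (pvUnderscoreStepB bv.1 bv.2) ps) particles)).items) event_data

-- ===== PRECONDITION & SPEC =====
-- Pre_ excludes event_data association lists with duplicate category keys or duplicate particle keys
-- inside a category: such lists do not arise from Python dicts (A updates every duplicate entry while a
-- dict has only one), so nothing is claimed about them.
def Pre_update_data (matched_data : List (String × List (String × Int))) (event_data : List (String × List (String × List (String × Int)))) : Prop :=
  (event_data.map Prod.fst).Nodup ∧ ∀ p ∈ event_data, (p.2.map Prod.fst).Nodup
instance (matched_data : List (String × List (String × Int))) (event_data : List (String × List (String × List (String × Int)))) : Decidable (Pre_update_data matched_data event_data) := by unfold Pre_update_data; infer_instance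
def pvWitness_update_data : (List (String × List (String × Int))) × (List (String × List (String × List (String × Int)))) :=
  ([("cat", [("mu_pt", 7)])], [("cat", [("mu", [("pt", 0)])])])
def Spec_update_data (matched_data : List (String × List (String × Int))) (event_data : List (String × List (String × List (String × Int)))) (out : List (String × List (String × List (String × Int)))) : Prop := out = update_data_alt matched_data event_data
instance (matched_data : List (String × List (String × Int))) (event_data : List (String × List (String × List (String × Int)))) (out : List (String × List (String × List (String × Int)))) : Decidable (Spec_update_data matched_data event_data out) := by unfold Spec_update_data; infer_instance

-- ===== CLAIM (what is proved, stated in full; the proofs are below) =====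
def Claim_equal_update_data : Prop := ∀ (matched_data : List (String × List (String × Int))) (event_data : List (String × List (String × List (String × Int)))), Dom_update_data matched_data event_data → Pre_update_data matched_data event_data → Spec_update_data matched_data event_data (update_data matched_data event_data)

-- ===== LEMMAS AND PROOFS =====

-- the effect B's per-underscore loop body has on the value stored at one particle key
def pvChainStep (branch : String) (value : Int) (pname : String)
    (f : List (String × Int)) (ic : Int × Char) : List (String × Int) :=
  if ic.2 = '_' ∧ pname = PySem.Str.slice branch none (some ic.1) then
    pvSetFieldValue branch (PySem.Str.slice branch (some (ic.1 + 1)) none) value f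
  else f

-- keys are unchanged by an entrywise map
lemma map_fst_map_entry {ν : Type} (F : (String × ν) → ν) (ps : List (String × ν)) :
    (ps.map (fun pf => (pf.1, F pf))).map Prod.fst = ps.map Prod.fst := by
  rw [List.map_map]
  congr 1

lemma nodup_fst_map_entry {ν : Type} (F : (String × ν) → ν) (ps : List (String × ν))
    (h : (ps.map Prod.fst).Nodup) : ((ps.map (fun pf => (pf.1, F pf))).map Prod.fst).Nodup := by
  rw [map_fst_map_entry]
  exact h

-- one B step, on a nodup-key particles list, is an entrywise map
lemma stepB_eq_map (b : String) (v : Int) (ps : List (String × List (String × Int)))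
    (hnd : (ps.map Prod.fst).Nodup) (ic : Int × Char) :
    pvUnderscoreStepB b v ps ic = ps.map (fun pf => (pf.1, pvChainStep b v pf.1 pf.2 ic)) := by
  by_cases hc : ic.2 = '_'
  · rcases hget : (PySem.Dict.mk ps).get? (PySem.Str.slice b none (some ic.1)) with _ | fields
    · have hmem : PySem.Str.slice b none (some ic.1) ∉ (PySem.Dict.mk ps).keys :=
        (PySem.Dict.get?_eq_none_iff_not_mem_keys _ _).mp hget
      rw [PySem.Dict.keys_mk] at hmem
      simp only [pvUnderscoreStepB, hc, hget, if_true]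
      have hpt : ∀ pf ∈ ps, (pf.1, pvChainStep b v pf.1 pf.2 ic) = pf := by
        intro pf hpf
        have hne : pf.1 ≠ PySem.Str.slice b none (some ic.1) := by
          intro h
          exact hmem (h ▸ List.mem_map.mpr ⟨pf, hpf, rfl⟩)
        simp only [pvChainStep]
        rw [if_neg (by tauto)]
      exact ((List.map_congr_left hpt).trans (List.map_id _)).symm
    · have hcont : (PySem.Dict.mk ps).contains (PySem.Str.slice b none (some ic.1)) = true := by
        rw [PySem.Dict.contains_eq_isSome_get?, hget]; rfl
      simp only [pvUnderscoreStepB, hc, hget, if_true]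
      rw [PySem.Dict.items_insert_of_contains _ _ hcont]
      apply List.map_congr_left
      intro pf hpf
      by_cases hk : pf.1 = PySem.Str.slice b none (some ic.1)
      · have hfe : pf.2 = fields := by
          have h2 : (PySem.Dict.mk ps).get? pf.1 = some pf.2 :=
            PySem.Dict.get?_of_mem_items (PySem.Dict.mk ps) hpf (by rw [PySem.Dict.keys_mk]; exact hnd)
          rw [hk, hget] at h2
          exact (Option.some.inj h2).symm
        rw [if_pos (beq_iff_eq.mpr hk)]
        simp only [pvChainStep, hc, true_and]
        rw [if_pos hk, hk, hfe]
      · simp only [pvChainStep]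
        rw [if_neg (by simpa using hk), if_neg (by tauto)]
  · simp only [pvUnderscoreStepB, pvChainStep]
    rw [if_neg hc]
    have hpt : ∀ pf ∈ ps, (pf.1, if ic.2 = '_' ∧ pf.1 = PySem.Str.slice b none (some ic.1) then
        pvSetFieldValue b (PySem.Str.slice b (some (ic.1 + 1)) none) v pf.2 else pf.2) = pf := by
      intro pf hpf
      rw [if_neg (by tauto)]
    exact ((List.map_congr_left hpt).trans (List.map_id _)).symm

-- B's whole per-branch fold over any index/char list, entrywise
lemma foldB_eq_map (b : String) (v : Int) (L : List (Int × Char))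
    (ps : List (String × List (String × Int))) (hnd : (ps.map Prod.fst).Nodup) :
    L.foldl (pvUnderscoreStepB b v) ps
      = ps.map (fun pf => (pf.1, L.foldl (pvChainStep b v pf.1) pf.2)) := by
  induction L generalizing ps with
  | nil =>
    simp
  | cons ic L ih =>
    rw [List.foldl_cons, stepB_eq_map b v ps hnd ic]
    rw [ih (ps.map (fun pf => (pf.1, pvChainStep b v pf.1 pf.2 ic)))
        (nodup_fst_map_entry _ ps hnd)]
    simp [List.map_map, Function.comp]

-- a chain fold whose condition never fires is the identity
lemma foldl_chain_id (b : String) (v : Int) (p : String) (L : List (Int × Char))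
    (f : List (String × Int)) (h : ∀ ic ∈ L, ¬ (ic.2 = '_' ∧ p = PySem.Str.slice b none (some ic.1))) :
    L.foldl (pvChainStep b v p) f = f := by
  induction L generalizing f with
  | nil => rfl
  | cons ic L ih =>
    rw [List.foldl_cons]
    simp only [pvChainStep]
    rw [if_neg (h ic (List.mem_cons_self ..))]
    exact ih f (fun x hx => h x (List.mem_cons_of_mem _ hx))

-- bridge: Chars.slice is the List slice on code points
lemma chars_slice_eq (xs : List Char) (a? b? : Option Int) :
    PySem.Chars.slice xs a? b? = PySem.List.slice xs a? b? := rfl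

-- the chain over the enumerate of the branch name is exactly A's per-particle step
lemma chain_enumerate_eq_stepA (b : String) (v : Int) (p : String) (f : List (String × Int)) :
    (PySem.List.enumerate b.toList 0).foldl (pvChainStep b v p) f = pvParticleStepA b v p f := by
  have hn : ∀ (k : Nat), (PySem.Str.slice b none (some (k : Int))).toList = b.toList.take k := by
    intro k
    rw [PySem.Str.toList_slice, chars_slice_eq, PySem.List.slice_to_natCast]
  by_cases hsw : PySem.Str.startswith b (p ++ "_") = true
  · have hpre : p.toList ++ ['_'] <+: b.toList := by
      have := (PySem.Chars.startswith_iff b.toList (p ++ "_").toList).mp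
        (by rw [← PySem.Str.startswith_eq]; exact hsw)
      simpa using this
    obtain ⟨rest, hcs⟩ := hpre
    have hb : b.toList = p.toList ++ '_' :: rest := by rw [← hcs]; simp
    rw [hb, PySem.List.enumerate_append, PySem.List.enumerate_cons, List.foldl_append]
    have h1 : (PySem.List.enumerate p.toList 0).foldl (pvChainStep b v p) f = f := by
      apply foldl_chain_id
      intro ic hic
      rw [PySem.List.mem_enumerate_iff] at hic
      obtain ⟨k, hk, rfl⟩ := hic
      rintro ⟨-, hsl⟩
      have h2 : p.toList = b.toList.take k := by
        have h4 := congrArg String.toList hsl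
        rw [show (0 : Int) + (k : Int) = ((k : Nat) : Int) by ring, hn k] at h4
        exact h4
      have h5 : p.toList.length = min k b.toList.length := by rw [h2, List.length_take]
      omega
    rw [h1, List.foldl_cons]
    have hc2 : p = PySem.Str.slice b none (some ((0 : Int) + (p.toList.length : Int))) := by
      apply String.toList_inj.mp
      rw [show (0 : Int) + (p.toList.length : Int) = ((p.toList.length : Nat) : Int) by ring,
          hn p.toList.length, hb]
      simp
    have hstep : pvChainStep b v p f ((0 : Int) + (p.toList.length : Int), '_')
        = pvSetFieldValue b (PySem.Str.slice b (some ((0 : Int) + (p.toList.length : Int) + 1)) none) v f := by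
      simp only [pvChainStep, true_and]
      rw [if_pos hc2]
    rw [hstep]
    have h3 : (PySem.List.enumerate rest ((0 : Int) + (p.toList.length : Int) + 1)).foldl (pvChainStep b v p)
        (pvSetFieldValue b (PySem.Str.slice b (some ((0 : Int) + (p.toList.length : Int) + 1)) none) v f)
        = pvSetFieldValue b (PySem.Str.slice b (some ((0 : Int) + (p.toList.length : Int) + 1)) none) v f := by
      apply foldl_chain_id
      intro ic hic
      rw [PySem.List.mem_enumerate_iff] at hic
      obtain ⟨k, hk, rfl⟩ := hic
      rintro ⟨-, hsl⟩
      have h2 : p.toList = b.toList.take (p.toList.length + 1 + k) := by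
        have h4 := congrArg String.toList hsl
        rw [show (0 : Int) + (p.toList.length : Int) + 1 + (k : Int)
            = ((p.toList.length + 1 + k : Nat) : Int) by push_cast; ring, hn] at h4
        exact h4
      have h5 := congrArg List.length h2
      rw [List.length_take] at h5
      have h6 : b.toList.length = p.toList.length + 1 + rest.length := by
        rw [hb]; simp; omega
      omega
    rw [h3]
    simp only [pvParticleStepA]
    rw [if_pos hsw]
    have harg : PySem.Str.len (p ++ "_") = (0 : Int) + (p.toList.length : Int) + 1 := by
      rw [PySem.Str.len_eq]
      have h7 : (p ++ "_").toList = p.toList ++ ['_'] := by simp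
      rw [h7, List.length_append, List.length_singleton]
      push_cast
      ring
    rw [harg]
  · have hnpre : ¬ (p.toList ++ ['_'] <+: b.toList) := by
      intro hpre
      exact hsw (by
        rw [PySem.Str.startswith_eq, PySem.Chars.startswith_iff]
        simpa using hpre)
    have h1 : (PySem.List.enumerate b.toList 0).foldl (pvChainStep b v p) f = f := by
      apply foldl_chain_id
      intro ic hic
      rw [PySem.List.mem_enumerate_iff] at hic
      obtain ⟨k, hk, rfl⟩ := hic
      rintro ⟨hund, hsl⟩
      have hund' : b.toList[k] = '_' := hund
      have h2 : p.toList = b.toList.take k := by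
        have h4 := congrArg String.toList hsl
        rw [show (0 : Int) + (k : Int) = ((k : Nat) : Int) by ring, hn k] at h4
        exact h4
      apply hnpre
      have h3 : b.toList.take (k + 1) = b.toList.take k ++ ['_'] := by
        rw [List.take_add_one]
        congr 1
        rw [List.getElem?_eq_getElem hk, hund']
        rfl
      rw [h2, ← h3]
      exact List.take_prefix _ _
    rw [h1]
    simp only [pvParticleStepA]
    rw [if_neg hsw]

-- both per-branch folds agree on a nodup-key particles list
lemma branch_fold_eq (brs : List (String × Int)) (ps : List (String × List (String × Int)))
    (hnd : (ps.map Prod.fst).Nodup) :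
    brs.foldl (fun ps bv => ps.map (fun pf => (pf.1, pvParticleStepA bv.1 bv.2 pf.1 pf.2))) ps
      = brs.foldl (fun ps bv => (PySem.List.enumerate bv.1.toList 0).foldl (pvUnderscoreStepB bv.1 bv.2) ps) ps := by
  induction brs generalizing ps with
  | nil => rfl
  | cons bv brs ih =>
    rw [List.foldl_cons, List.foldl_cons]
    rw [foldB_eq_map bv.1 bv.2 _ ps hnd]
    have hstep : ps.map (fun pf => (pf.1, (PySem.List.enumerate bv.1.toList 0).foldl (pvChainStep bv.1 bv.2 pf.1) pf.2))
        = ps.map (fun pf => (pf.1, pvParticleStepA bv.1 bv.2 pf.1 pf.2)) := by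
      apply List.map_congr_left
      intro pf _
      rw [chain_enumerate_eq_stepA]
    rw [hstep]
    exact ih _ (nodup_fst_map_entry _ ps hnd)

-- keys are unchanged by A's per-branch fold
lemma map_fst_branch_fold (brs : List (String × Int)) (ps : List (String × List (String × Int))) :
    ((brs.foldl (fun ps bv => ps.map (fun pf => (pf.1, pvParticleStepA bv.1 bv.2 pf.1 pf.2))) ps).map Prod.fst)
      = ps.map Prod.fst := by
  induction brs generalizing ps with
  | nil => rfl
  | cons bv brs ih =>
    rw [List.foldl_cons, ih]
    exact map_fst_map_entry _ ps

-- inserting the value a key already holds changes nothing (nodup keys)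
lemma insert_self_items {ν : Type} (d : List (String × ν)) (c : String) (x : ν)
    (hnd : (d.map Prod.fst).Nodup) (hget : (PySem.Dict.mk d).get? c = some x) :
    ((PySem.Dict.mk d).insert c x).items = d := by
  have hcont : (PySem.Dict.mk d).contains c = true := by
    rw [PySem.Dict.contains_eq_isSome_get?, hget]; rfl
  rw [PySem.Dict.items_insert_of_contains _ _ hcont]
  have hpt : ∀ pf ∈ d, (if (pf.1 == c) = true then (c, x) else pf) = pf := by
    intro pf hpf
    by_cases hk : pf.1 = c
    · have h2 : (PySem.Dict.mk d).get? pf.1 = some pf.2 :=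
        PySem.Dict.get?_of_mem_items (PySem.Dict.mk d) hpf (by rw [PySem.Dict.keys_mk]; exact hnd)
      rw [hk, hget] at h2
      rw [if_pos (beq_iff_eq.mpr hk), ← hk, Option.some.inj h2]
    · rw [if_neg (by simpa using hk)]
  exact (List.map_congr_left hpt).trans (List.map_id _)

-- A's category loop (re-reading and re-inserting event_data[category] at every branch) collapses to one insert
lemma A_cat_fold (c : String) (brs : List (String × Int))
    (ev : List (String × List (String × List (String × Int))))
    (particles : List (String × List (String × Int)))
    (hnd : (ev.map Prod.fst).Nodup)
    (hget : (PySem.Dict.mk ev).get? c = some particles) :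
    brs.foldl (fun ev2 bv =>
        ((PySem.Dict.mk ev2).insert c
          (((PySem.Dict.mk ev2).getD c []).map
            (fun pf => (pf.1, pvParticleStepA bv.1 bv.2 pf.1 pf.2)))).items) ev
      = ((PySem.Dict.mk ev).insert c
          (brs.foldl (fun ps bv => ps.map (fun pf => (pf.1, pvParticleStepA bv.1 bv.2 pf.1 pf.2))) particles)).items := by
  induction brs generalizing ev particles with
  | nil =>
    rw [List.foldl_nil, List.foldl_nil]
    exact (insert_self_items ev c particles hnd hget).symm
  | cons bv brs ih =>
    rw [List.foldl_cons, List.foldl_cons]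
    have hcont : (PySem.Dict.mk ev).contains c = true := by
      rw [PySem.Dict.contains_eq_isSome_get?, hget]; rfl
    have hgd : (PySem.Dict.mk ev).getD c [] = particles :=
      PySem.Dict.getD_of_get?_eq_some _ _ hget
    rw [hgd]
    have hkeys : (((PySem.Dict.mk ev).insert c
        (particles.map (fun pf => (pf.1, pvParticleStepA bv.1 bv.2 pf.1 pf.2)))).items.map Prod.fst).Nodup := by
      have hk2 := PySem.Dict.keys_insert_of_contains (PySem.Dict.mk ev)
        (particles.map (fun pf => (pf.1, pvParticleStepA bv.1 bv.2 pf.1 pf.2))) hcont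
      show (((PySem.Dict.mk ev).insert c _).keys).Nodup
      rw [hk2, PySem.Dict.keys_mk]
      exact hnd
    have hget' : (PySem.Dict.mk (((PySem.Dict.mk ev).insert c
        (particles.map (fun pf => (pf.1, pvParticleStepA bv.1 bv.2 pf.1 pf.2)))).items)).get? c
        = some (particles.map (fun pf => (pf.1, pvParticleStepA bv.1 bv.2 pf.1 pf.2))) :=
      PySem.Dict.get?_insert_self _ _ _
    rw [ih _ _ hkeys hget']
    rw [PySem.Dict.insert_insert_self]

-- the top-level invariant: keys are unique, and so are each category's particle keys
def pvInv (ev : List (String × List (String × List (String × Int)))) : Prop :=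
  (ev.map Prod.fst).Nodup ∧ ∀ p ∈ ev, (p.2.map Prod.fst).Nodup

-- the two top-level folds agree under the invariant
lemma top_fold_eq (md : List (String × List (String × Int)))
    (ev : List (String × List (String × List (String × Int)))) (hinv : pvInv ev) :
    md.foldl (fun ev cat =>
      if (PySem.Dict.mk ev).contains cat.1 then
        cat.2.foldl (fun ev2 bv =>
          ((PySem.Dict.mk ev2).insert cat.1
            (((PySem.Dict.mk ev2).getD cat.1 []).map
              (fun pf => (pf.1, pvParticleStepA bv.1 bv.2 pf.1 pf.2)))).items) ev
      else ev) ev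
    = md.foldl (fun ev cat =>
        match (PySem.Dict.mk ev).get? cat.1 with
        | none => ev
        | some particles =>
          ((PySem.Dict.mk ev).insert cat.1
            (cat.2.foldl (fun ps bv =>
              (PySem.List.enumerate bv.1.toList 0).foldl (pvUnderscoreStepB bv.1 bv.2) ps) particles)).items) ev := by
  induction md generalizing ev with
  | nil => rfl
  | cons cat md ih =>
    rw [List.foldl_cons, List.foldl_cons]
    rcases hget : (PySem.Dict.mk ev).get? cat.1 with _ | particles
    · have hcont : (PySem.Dict.mk ev).contains cat.1 = false := by
        rw [PySem.Dict.contains_eq_isSome_get?, hget]; rfl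
      rw [if_neg (by rw [hcont]; simp)]
      exact ih ev hinv
    · have hcont : (PySem.Dict.mk ev).contains cat.1 = true := by
        rw [PySem.Dict.contains_eq_isSome_get?, hget]; rfl
      have hpnd : (particles.map Prod.fst).Nodup := by
        have hmem : (cat.1, particles) ∈ ev :=
          PySem.Dict.mem_items_of_get?_eq_some (PySem.Dict.mk ev) hget
        exact hinv.2 _ hmem
      rw [if_pos hcont, A_cat_fold cat.1 cat.2 ev particles hinv.1 hget,
          branch_fold_eq cat.2 particles hpnd]
      set qs := cat.2.foldl (fun ps bv =>
        (PySem.List.enumerate bv.1.toList 0).foldl (pvUnderscoreStepB bv.1 bv.2) ps) particles with hqs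
      apply ih
      constructor
      · show (((PySem.Dict.mk ev).insert cat.1 qs).keys).Nodup
        rw [PySem.Dict.keys_insert_of_contains _ _ hcont, PySem.Dict.keys_mk]
        exact hinv.1
      · intro p hp
        have hp' : p = (cat.1, qs) ∨ p ∈ ev ∧ p.1 ≠ cat.1 := by
          have hmi := (PySem.Dict.mem_items_insert (PySem.Dict.mk ev) cat.1 qs p).mp hp
          simpa using hmi
        rcases hp' with rfl | ⟨hp2, -⟩
        · show (qs.map Prod.fst).Nodup
          rw [hqs, ← branch_fold_eq cat.2 particles hpnd, map_fst_branch_fold]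
          exact hpnd
        · exact hinv.2 _ hp2

-- ===== VERDICT (by name: the statement is the Claim_ definition above) =====
theorem update_data_spec : Claim_equal_update_data := by
  intro md ed _ hpre
  unfold Spec_update_data update_data update_data_alt
  exact top_fold_eq md ed (by exact hpre)
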